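-- pv_equiv track=rewrite | github.com/avidixit88/CEODASH-v48 | nextcure_intelligence_v0_9_33_protocol_vs_outcome_evidence/engines/clinical_trials_engine.py | _phase_stage_phrase
-- ===== SOURCE A (Python) =====
-- def _phase_stage_phrase(phases: list[str] | set[str]) -> str:
--     clean = {str(p).upper().replace(" ", "") for p in phases if p and p != "Not specified"}
--     if any("PHASE3" in p for p in clean):
--         return "the landscape includes late-stage programs, so the field is no longer purely exploratory"
--     if any("PHASE2" in p for p in clean):
--         return "mid-stage studies are present, which suggests the space is moving beyond first-in-human exploration"
--     if any("PHASE1" in p for p in clean):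
--         return "the activity is still mostly early-stage, leaving room for differentiated clinical positioning"
--     return "phase detail is inconsistent, so maturity should be interpreted cautiously"
-- ===== SOURCE B (Python) =====
-- def _level(p):
--     if "PHASE3" in p:
--         return 3
--     if "PHASE2" in p:
--         return 2
--     if "PHASE1" in p:
--         return 1
--     return 0
--
-- def _phase_stage_phrase(phases):
--     clean = {str(p).upper().replace(" ", "") for p in phases if p and p != "Not specified"}
--     level = 0
--     for p in clean:
--         level = max(level, _level(p))
--     if level == 3:
--         return "the landscape includes late-stage programs, so the field is no longer purely exploratory"
--     if level == 2:
--         return "mid-stage studies are present, which suggests the space is moving beyond first-in-human exploration"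
--     if level == 1:
--         return "the activity is still mostly early-stage, leaving room for differentiated clinical positioning"
--     return "phase detail is inconsistent, so maturity should be interpreted cautiously"
-- ===== Notes on version B (the rewrite author's own statement) =====
-- stated objective: alternative
-- what changed: Replaces the three separate any(...) scans over the cleaned set by a single pass computing a numeric max phase level per string, then maps the level to the phrase.
import Mathlib
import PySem

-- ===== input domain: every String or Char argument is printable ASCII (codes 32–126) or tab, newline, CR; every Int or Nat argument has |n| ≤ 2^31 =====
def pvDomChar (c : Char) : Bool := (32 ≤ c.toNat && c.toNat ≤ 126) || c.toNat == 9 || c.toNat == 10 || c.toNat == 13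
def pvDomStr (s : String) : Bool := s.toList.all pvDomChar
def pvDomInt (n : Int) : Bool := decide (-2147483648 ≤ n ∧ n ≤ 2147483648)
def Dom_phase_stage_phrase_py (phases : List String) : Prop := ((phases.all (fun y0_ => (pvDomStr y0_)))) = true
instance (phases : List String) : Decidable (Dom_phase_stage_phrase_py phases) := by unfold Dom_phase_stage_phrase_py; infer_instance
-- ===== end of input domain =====

-- B replaces A's three separate any(...) scans by one pass computing a numeric max phase level, then maps the level to the phrase (alternative decomposition, same cost).


-- ===== PORT A =====
-- the set comprehension {str(p).upper().replace(" ", "") for p in phases if p and p != "Not specified"}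
-- (identical line in both Pythons, shared helper)
def pvClean (phases : List String) : PySem.Set String :=
  PySem.Set.ofList
    ((phases.filter (fun p => !(p == "") && !(p == "Not specified"))).map
      (fun p => PySem.Str.replace (PySem.Str.upper p) " " ""))

def phase_stage_phrase_py (phases : List String) : String :=
  let clean := pvClean phases
  if clean.any (fun p => PySem.Str.isIn "PHASE3" p) then
    "the landscape includes late-stage programs, so the field is no longer purely exploratory"
  else if clean.any (fun p => PySem.Str.isIn "PHASE2" p) then
    "mid-stage studies are present, which suggests the space is moving beyond first-in-human exploration"
  else if clean.any (fun p => PySem.Str.isIn "PHASE1" p) then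
    "the activity is still mostly early-stage, leaving room for differentiated clinical positioning"
  else
    "phase detail is inconsistent, so maturity should be interpreted cautiously"

-- ===== PORT B =====
def pvLevel (p : String) : Nat :=
  if PySem.Str.isIn "PHASE3" p then 3
  else if PySem.Str.isIn "PHASE2" p then 2
  else if PySem.Str.isIn "PHASE1" p then 1
  else 0

def phase_stage_phrase_py_alt (phases : List String) : String :=
  let clean := pvClean phases
  let level := clean.foldl (fun acc p => max acc (pvLevel p)) 0
  if level = 3 then
    "the landscape includes late-stage programs, so the field is no longer purely exploratory"
  else if level = 2 then
    "mid-stage studies are present, which suggests the space is moving beyond first-in-human exploration"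
  else if level = 1 then
    "the activity is still mostly early-stage, leaving room for differentiated clinical positioning"
  else
    "phase detail is inconsistent, so maturity should be interpreted cautiously"

-- ===== PRECONDITION & SPEC =====
def Spec_phase_stage_phrase_py (phases : List String) (out : String) : Prop := out = phase_stage_phrase_py_alt phases
instance (phases : List String) (out : String) : Decidable (Spec_phase_stage_phrase_py phases out) := by unfold Spec_phase_stage_phrase_py; infer_instance

-- ===== CLAIM (what is proved, stated in full; the proofs are below) =====
def Claim_equal_phase_stage_phrase_py : Prop := ∀ (phases : List String), Dom_phase_stage_phrase_py phases → Spec_phase_stage_phrase_py phases (phase_stage_phrase_py phases)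

-- ===== LEMMAS AND PROOFS =====

theorem pvLevel_le (p : String) : pvLevel p ≤ 3 := by
  unfold pvLevel; split_ifs <;> omega

theorem pvFoldl_le (l : List String) : ∀ a : Nat, a ≤ 3 →
    l.foldl (fun acc p => max acc (pvLevel p)) a ≤ 3 := by
  induction l with
  | nil => intro a ha; simpa using ha
  | cons p l ih =>
      intro a ha
      simp only [List.foldl]
      exact ih _ (max_le ha (pvLevel_le p))

theorem pvFoldl_thresh (t : Nat) (l : List String) : ∀ a : Nat,
    (t ≤ l.foldl (fun acc p => max acc (pvLevel p)) a ↔ t ≤ a ∨ ∃ p ∈ l, t ≤ pvLevel p) := by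
  induction l with
  | nil => intro a; simp
  | cons p l ih =>
      intro a
      simp only [List.foldl, ih, le_max_iff, List.mem_cons]
      constructor
      · rintro (( h | h ) | ⟨q, hq, h⟩)
        · exact Or.inl h
        · exact Or.inr ⟨p, Or.inl rfl, h⟩
        · exact Or.inr ⟨q, Or.inr hq, h⟩
      · rintro (h | ⟨q, (rfl | hq), h⟩)
        · exact Or.inl (Or.inl h)
        · exact Or.inl (Or.inr h)
        · exact Or.inr ⟨q, hq, h⟩

theorem pvLevel_ge3 (p : String) : 3 ≤ pvLevel p ↔ PySem.Str.isIn "PHASE3" p = true := by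
  unfold pvLevel; split_ifs with h1 h2 h3 <;> simp_all

theorem pvLevel_ge2 (p : String) :
    2 ≤ pvLevel p ↔ (PySem.Str.isIn "PHASE3" p = true ∨ PySem.Str.isIn "PHASE2" p = true) := by
  unfold pvLevel; split_ifs with h1 h2 h3 <;> simp_all

theorem pvLevel_ge1 (p : String) :
    1 ≤ pvLevel p ↔ (PySem.Str.isIn "PHASE3" p = true ∨ PySem.Str.isIn "PHASE2" p = true ∨
      PySem.Str.isIn "PHASE1" p = true) := by
  unfold pvLevel; split_ifs with h1 h2 h3 <;> simp_all

-- the core fact: the three-any chain over any list equals the max-level dispatch over it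
theorem pvChain_eq (l : List String) :
    (if l.any (fun p => PySem.Str.isIn "PHASE3" p) then
      "the landscape includes late-stage programs, so the field is no longer purely exploratory"
    else if l.any (fun p => PySem.Str.isIn "PHASE2" p) then
      "mid-stage studies are present, which suggests the space is moving beyond first-in-human exploration"
    else if l.any (fun p => PySem.Str.isIn "PHASE1" p) then
      "the activity is still mostly early-stage, leaving room for differentiated clinical positioning"
    else
      "phase detail is inconsistent, so maturity should be interpreted cautiously") =
    (if l.foldl (fun acc p => max acc (pvLevel p)) 0 = 3 then
      "the landscape includes late-stage programs, so the field is no longer purely exploratory"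
     else if l.foldl (fun acc p => max acc (pvLevel p)) 0 = 2 then
      "mid-stage studies are present, which suggests the space is moving beyond first-in-human exploration"
     else if l.foldl (fun acc p => max acc (pvLevel p)) 0 = 1 then
      "the activity is still mostly early-stage, leaving room for differentiated clinical positioning"
     else
      "phase detail is inconsistent, so maturity should be interpreted cautiously") := by
  set m := l.foldl (fun acc p => max acc (pvLevel p)) 0 with hm
  have hle : m ≤ 3 := pvFoldl_le l 0 (by omega)
  by_cases h3 : l.any (fun p => PySem.Str.isIn "PHASE3" p) = true
  · have : 3 ≤ m := by
      rw [hm, pvFoldl_thresh]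
      right
      obtain ⟨p, hp, hc⟩ := List.any_eq_true.mp h3
      exact ⟨p, hp, (pvLevel_ge3 p).mpr hc⟩
    have hm3 : m = 3 := le_antisymm hle this
    rw [if_pos h3, if_pos hm3]
  · have hn3 : ¬ 3 ≤ m := by
      rw [hm, pvFoldl_thresh]
      rintro (h | ⟨p, hp, h⟩)
      · omega
      · exact h3 (List.any_eq_true.mpr ⟨p, hp, (pvLevel_ge3 p).mp h⟩)
    by_cases h2 : l.any (fun p => PySem.Str.isIn "PHASE2" p) = true
    · have : 2 ≤ m := by
        rw [hm, pvFoldl_thresh]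
        right
        obtain ⟨p, hp, hc⟩ := List.any_eq_true.mp h2
        exact ⟨p, hp, (pvLevel_ge2 p).mpr (Or.inr hc)⟩
      have hm2 : m = 2 := by omega
      rw [if_neg h3, if_pos h2, if_neg (show ¬ m = 3 by omega), if_pos hm2]
    · have hn2 : ¬ 2 ≤ m := by
        rw [hm, pvFoldl_thresh]
        rintro (h | ⟨p, hp, h⟩)
        · omega
        · rcases (pvLevel_ge2 p).mp h with hc | hc
          · exact h3 (List.any_eq_true.mpr ⟨p, hp, hc⟩)
          · exact h2 (List.any_eq_true.mpr ⟨p, hp, hc⟩)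
      by_cases h1 : l.any (fun p => PySem.Str.isIn "PHASE1" p) = true
      · have : 1 ≤ m := by
          rw [hm, pvFoldl_thresh]
          right
          obtain ⟨p, hp, hc⟩ := List.any_eq_true.mp h1
          exact ⟨p, hp, (pvLevel_ge1 p).mpr (Or.inr (Or.inr hc))⟩
        have hm1 : m = 1 := by omega
        rw [if_neg h3, if_neg h2, if_pos h1, if_neg (show ¬ m = 3 by omega),
          if_neg (show ¬ m = 2 by omega), if_pos hm1]
      · have hn1 : ¬ 1 ≤ m := by
          rw [hm, pvFoldl_thresh]
          rintro (h | ⟨p, hp, h⟩)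
          · omega
          · rcases (pvLevel_ge1 p).mp h with hc | hc | hc
            · exact h3 (List.any_eq_true.mpr ⟨p, hp, hc⟩)
            · exact h2 (List.any_eq_true.mpr ⟨p, hp, hc⟩)
            · exact h1 (List.any_eq_true.mpr ⟨p, hp, hc⟩)
        have hm0 : m = 0 := by omega
        rw [if_neg h3, if_neg h2, if_neg h1, if_neg (show ¬ m = 3 by omega),
          if_neg (show ¬ m = 2 by omega), if_neg (show ¬ m = 1 by omega)]

-- ===== VERDICT (by name: the statement is the Claim_ definition above) =====
theorem phase_stage_phrase_py_spec : Claim_equal_phase_stage_phrase_py := by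
  intro phases _
  unfold Spec_phase_stage_phrase_py phase_stage_phrase_py phase_stage_phrase_py_alt
  exact pvChain_eq (pvClean phases)
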